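-- pv_equiv track=rewrite | github.com/ThirdKeyAI/SchemaPin | python/schemapin/skill.py | detect_tampered_files
-- ===== SOURCE A (Python) =====
-- from typing import Any, Dict, List, Optional, Tuple, Union
--
-- def detect_tampered_files(
--     current_manifest: Dict[str, str],
--     signed_manifest: Dict[str, str],
-- ) -> Dict[str, List[str]]:
--     """Compare current file manifest against the signed manifest.
--
--     Returns:
--         Dict with keys "modified", "added", "removed" — each a list of
--         relative file paths.
--     """
--     current_keys = set(current_manifest)
--     signed_keys = set(signed_manifest)
--
--     added = sorted(current_keys - signed_keys)
--     removed = sorted(signed_keys - current_keys)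
--     modified = sorted(
--         k
--         for k in current_keys & signed_keys
--         if current_manifest[k] != signed_manifest[k]
--     )
--
--     return {"modified": modified, "added": added, "removed": removed}
-- ===== SOURCE B (Python) =====
-- def detect_tampered_files(
--     current_manifest,
--     signed_manifest,
-- ):
--     """Compare current file manifest against the signed manifest.
--
--     Sorts both key lists, then classifies keys with a single two-pointer
--     merge; each output list is emitted already in sorted order, so no
--     result-list sort is needed.
--     """
--     cur_keys = sorted(current_manifest)
--     sig_keys = sorted(signed_manifest)
--     modified, added, removed = [], [], []
--     i = j = 0
--     while i < len(cur_keys) and j < len(sig_keys):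
--         a, b = cur_keys[i], sig_keys[j]
--         if a == b:
--             if current_manifest[a] != signed_manifest[b]:
--                 modified.append(a)
--             i += 1
--             j += 1
--         elif a < b:
--             added.append(a)
--             i += 1
--         else:
--             removed.append(b)
--             j += 1
--     added.extend(cur_keys[i:])
--     removed.extend(sig_keys[j:])
--     return {"modified": modified, "added": added, "removed": removed}
-- ===== Notes on version B (the rewrite author's own statement) =====
-- stated objective: alternative
-- what changed: Replaces the set-algebra version (build two key sets, take two differences and an intersection, then sort each of the three result lists) with sorting the two key lists once and classifying keys in a single two-pointer merge that emits each output list already in sorted order.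
import Mathlib
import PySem

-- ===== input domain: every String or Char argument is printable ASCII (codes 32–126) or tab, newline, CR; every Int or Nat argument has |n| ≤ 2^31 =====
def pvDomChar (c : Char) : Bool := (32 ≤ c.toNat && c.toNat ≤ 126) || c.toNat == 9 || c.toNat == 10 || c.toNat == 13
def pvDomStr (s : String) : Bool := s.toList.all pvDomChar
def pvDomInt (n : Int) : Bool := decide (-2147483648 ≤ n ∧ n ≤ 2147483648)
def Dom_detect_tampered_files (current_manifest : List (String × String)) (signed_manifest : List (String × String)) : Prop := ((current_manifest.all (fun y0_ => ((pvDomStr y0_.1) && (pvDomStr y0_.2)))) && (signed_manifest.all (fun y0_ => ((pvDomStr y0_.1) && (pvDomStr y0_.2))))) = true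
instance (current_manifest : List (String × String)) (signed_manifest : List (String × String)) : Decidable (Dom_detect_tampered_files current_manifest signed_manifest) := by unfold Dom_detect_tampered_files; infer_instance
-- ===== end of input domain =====

-- B sorts the two key lists once and classifies keys by a single two-pointer merge, so each
-- output list comes out already sorted (objective: alternative; return value only).

-- ===== PORT A =====
-- the dict arguments arrive as assoc lists; PySem.Dict.ofList is the dict they denote
def detect_tampered_files (current_manifest : List (String × String)) (signed_manifest : List (String × String)) : List (String × List String) :=
  let cur : PySem.Dict String String := PySem.Dict.ofList current_manifest
  let sig : PySem.Dict String String := PySem.Dict.ofList signed_manifest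
  let current_keys : PySem.Set String := PySem.Set.ofList cur.keys
  let signed_keys : PySem.Set String := PySem.Set.ofList sig.keys
  let added := PySem.List.sorted (PySem.Set.diff current_keys signed_keys) (fun x => x) false
  let removed := PySem.List.sorted (PySem.Set.diff signed_keys current_keys) (fun x => x) false
  let modified := PySem.List.sorted
    ((PySem.Set.inter current_keys signed_keys).filter
      (fun k => cur.getD k "" != sig.getD k "")) (fun x => x) false
  [("modified", modified), ("added", added), ("removed", removed)]

-- ===== PORT B =====
-- B's while loop over indices i, j: the two index suffixes become the two list arguments;
-- the three accumulating appends become the conses of the recursion's results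
def mergeClassify (cur sig : PySem.Dict String String) : List String → List String → List String × List String × List String
  | [], ys => ([], [], ys)                    -- loop over: extend removed with sig_keys[j:]
  | x :: xs, [] => ([], x :: xs, [])          -- loop over: extend added with cur_keys[i:]
  | a :: xs, b :: ys =>
    if a = b then
      let r := mergeClassify cur sig xs ys
      (if cur.getD a "" != sig.getD b "" then a :: r.1 else r.1, r.2.1, r.2.2)
    else if a < b then
      let r := mergeClassify cur sig xs (b :: ys)
      (r.1, a :: r.2.1, r.2.2)
    else
      let r := mergeClassify cur sig (a :: xs) ys
      (r.1, r.2.1, b :: r.2.2)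
  termination_by xs ys => xs.length + ys.length

def detect_tampered_files_alt (current_manifest : List (String × String)) (signed_manifest : List (String × String)) : List (String × List String) :=
  let cur : PySem.Dict String String := PySem.Dict.ofList current_manifest
  let sig : PySem.Dict String String := PySem.Dict.ofList signed_manifest
  let cur_keys := PySem.List.sorted cur.keys (fun x => x) false
  let sig_keys := PySem.List.sorted sig.keys (fun x => x) false
  let r := mergeClassify cur sig cur_keys sig_keys
  [("modified", r.1), ("added", r.2.1), ("removed", r.2.2)]

-- ===== PRECONDITION & SPEC =====
def Spec_detect_tampered_files (current_manifest : List (String × String)) (signed_manifest : List (String × String)) (out : List (String × List String)) : Prop := out = detect_tampered_files_alt current_manifest signed_manifest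
instance (current_manifest : List (String × String)) (signed_manifest : List (String × String)) (out : List (String × List String)) : Decidable (Spec_detect_tampered_files current_manifest signed_manifest out) := by unfold Spec_detect_tampered_files; infer_instance

-- ===== CLAIM (what is proved, stated in full; the proofs are below) =====
def Claim_equal_detect_tampered_files : Prop := ∀ (current_manifest : List (String × String)) (signed_manifest : List (String × String)), Dom_detect_tampered_files current_manifest signed_manifest → Spec_detect_tampered_files current_manifest signed_manifest (detect_tampered_files current_manifest signed_manifest)

-- ===== LEMMAS AND PROOFS =====

-- sorted(l) of a duplicate-free list is strictly increasing
theorem sorted_id_pairwise_lt (l : List String) (h : l.Nodup) :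
    (PySem.List.sorted l (fun x => x) false).Pairwise (· < ·) := by
  have hle := PySem.List.sorted_pairwise l (fun x => x)
  have hnd : (PySem.List.sorted l (fun x => x) false).Nodup :=
    (PySem.List.sorted_perm l (fun x => x) false).nodup_iff.mpr h
  exact (hle.and hnd).imp (fun hab => lt_of_le_of_ne hab.1 hab.2)

-- sorting commutes with filtering on a duplicate-free list
theorem sorted_filter (l : List String) (h : l.Nodup) (p : String → Bool) :
    PySem.List.sorted (l.filter p) (fun x => x) false
      = (PySem.List.sorted l (fun x => x) false).filter p := by
  apply PySem.List.sorted_eq_of_perm_of_pairwise_lt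
  · exact (PySem.List.sorted_perm l (fun x => x) false).filter p
  · exact (sorted_id_pairwise_lt l h).sublist List.filter_sublist

-- B's two-pointer merge of two strictly increasing key lists, as three filters
theorem mergeClassify_eq (cur sig : PySem.Dict String String) :
    ∀ (xs ys : List String), xs.Pairwise (· < ·) → ys.Pairwise (· < ·) →
    mergeClassify cur sig xs ys =
      (xs.filter (fun k => decide (k ∈ ys) && (cur.getD k "" != sig.getD k "")),
       xs.filter (fun k => !decide (k ∈ ys)),
       ys.filter (fun k => !decide (k ∈ xs))) := by
  intro xs ys
  fun_induction mergeClassify cur sig xs ys with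
  | case1 ys =>
    intro _ _
    simp
  | case2 x xs =>
    intro _ _
    simp
  | case3 xs a ys r ih =>
    intro hx hy
    have ih' := ih (hx.sublist (List.sublist_cons_self a xs)) (hy.sublist (List.sublist_cons_self a ys))
    simp only [r, ih']
    have hxs : ∀ k ∈ xs, a < k := fun k hk => (List.pairwise_cons.mp hx).1 k hk
    have hys : ∀ k ∈ ys, a < k := fun k hk => (List.pairwise_cons.mp hy).1 k hk
    have h1 : ∀ k ∈ xs,
        (decide (k ∈ ys) && (cur.getD k "" != sig.getD k ""))
          = (decide (k ∈ a :: ys) && (cur.getD k "" != sig.getD k "")) := by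
      intro k hk
      have : k ≠ a := ne_of_gt (hxs k hk)
      simp [List.mem_cons, this]
    have h2 : ∀ k ∈ xs, (!decide (k ∈ ys)) = (!decide (k ∈ a :: ys)) := by
      intro k hk
      have : k ≠ a := ne_of_gt (hxs k hk)
      simp [List.mem_cons, this]
    have h3 : ∀ k ∈ ys, (!decide (k ∈ xs)) = (!decide (k ∈ a :: xs)) := by
      intro k hk
      have : k ≠ a := ne_of_gt (hys k hk)
      simp [List.mem_cons, this]
    refine Prod.ext ?_ (Prod.ext ?_ ?_)
    · rw [List.filter_congr h1]
      by_cases hd : (cur.getD a "" != sig.getD a "") = true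
      · simp [hd]
      · simp [hd]
    · rw [List.filter_congr h2]
      simp
    · rw [List.filter_congr h3]
      simp
  | case4 a xs b ys hne hlt r ih =>
    intro hx hy
    have ih' := ih (hx.sublist (List.sublist_cons_self a xs)) hy
    simp only [r, ih']
    have hys : ∀ k ∈ ys, b < k := fun k hk => (List.pairwise_cons.mp hy).1 k hk
    have hanot : a ∉ b :: ys := by
      intro hmem
      rcases List.mem_cons.mp hmem with h | h
      · exact hne h
      · exact absurd (lt_trans hlt (hys a h)) (lt_irrefl a)
    have h3 : ∀ k ∈ b :: ys, (!decide (k ∈ xs)) = (!decide (k ∈ a :: xs)) := by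
      intro k hk
      have hbk : b ≤ k := by
        rcases List.mem_cons.mp hk with h | h
        · exact le_of_eq h.symm
        · exact le_of_lt (hys k h)
      have : k ≠ a := ne_of_gt (lt_of_lt_of_le hlt hbk)
      simp [List.mem_cons, this]
    have han : a ∉ ys := fun h => hanot (List.mem_cons_of_mem b h)
    refine Prod.ext ?_ (Prod.ext ?_ ?_)
    · simp [hne, han]
    · simp [hne, han]
    · exact List.filter_congr h3
  | case5 a xs b ys hne hnlt r ih =>
    intro hx hy
    have ih' := ih hx (hy.sublist (List.sublist_cons_self b ys))
    simp only [r, ih']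
    have hgt : b < a := lt_of_le_of_ne (not_lt.mp hnlt) (fun h => hne h.symm)
    have hxs : ∀ k ∈ xs, a < k := fun k hk => (List.pairwise_cons.mp hx).1 k hk
    have hbnot : b ∉ a :: xs := by
      intro hmem
      rcases List.mem_cons.mp hmem with h | h
      · exact hne h.symm
      · exact absurd (lt_trans hgt (hxs b h)) (lt_irrefl b)
    have h1 : ∀ k ∈ a :: xs,
        (decide (k ∈ ys) && (cur.getD k "" != sig.getD k ""))
          = (decide (k ∈ b :: ys) && (cur.getD k "" != sig.getD k "")) := by
      intro k hk
      have hak : a ≤ k := by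
        rcases List.mem_cons.mp hk with h | h
        · exact le_of_eq h.symm
        · exact le_of_lt (hxs k h)
      have : k ≠ b := ne_of_gt (lt_of_lt_of_le hgt hak)
      simp [List.mem_cons, this]
    have h2 : ∀ k ∈ a :: xs, (!decide (k ∈ ys)) = (!decide (k ∈ b :: ys)) := by
      intro k hk
      have hak : a ≤ k := by
        rcases List.mem_cons.mp hk with h | h
        · exact le_of_eq h.symm
        · exact le_of_lt (hxs k h)
      have : k ≠ b := ne_of_gt (lt_of_lt_of_le hgt hak)
      simp [List.mem_cons, this]
    refine Prod.ext ?_ (Prod.ext ?_ ?_)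
    · exact List.filter_congr h1
    · exact List.filter_congr h2
    · have hbn : b ∉ xs := fun h => hbnot (List.mem_cons_of_mem a h)
      have hba : b ≠ a := fun h => hne h.symm
      simp [hba, hbn]

theorem detect_tampered_files_spec : Claim_equal_detect_tampered_files := by
  intro c s _
  unfold Spec_detect_tampered_files detect_tampered_files detect_tampered_files_alt
  simp only []
  set cur := PySem.Dict.ofList c with hcur
  set sig := PySem.Dict.ofList s with hsig
  have ndc : cur.keys.Nodup := PySem.Dict.nodup_keys_ofList c
  have nds : sig.keys.Nodup := PySem.Dict.nodup_keys_ofList s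
  have hc : PySem.Set.ofList cur.keys = cur.keys := PySem.Set.ofList_eq_self_of_nodup _ ndc
  have hs : PySem.Set.ofList sig.keys = sig.keys := PySem.Set.ofList_eq_self_of_nodup _ nds
  rw [mergeClassify_eq cur sig _ _ (sorted_id_pairwise_lt _ ndc) (sorted_id_pairwise_lt _ nds)]
  simp only [PySem.Set.inter, PySem.Set.diff, hc, hs, List.filter_filter]
  rw [sorted_filter _ ndc, sorted_filter _ ndc, sorted_filter _ nds]
  have e1 : List.filter (fun k => (cur.getD k "" != sig.getD k "") && PySem.Set.contains sig.keys k)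
        (PySem.List.sorted cur.keys (fun x => x) false)
      = List.filter (fun k => decide (k ∈ PySem.List.sorted sig.keys (fun x => x) false) && (cur.getD k "" != sig.getD k ""))
        (PySem.List.sorted cur.keys (fun x => x) false) := by
    apply List.filter_congr
    intro k _
    simp [PySem.List.mem_sorted, Bool.and_comm]
  have e2 : List.filter (fun x => !PySem.Set.contains sig.keys x)
        (PySem.List.sorted cur.keys (fun x => x) false)
      = List.filter (fun k => !decide (k ∈ PySem.List.sorted sig.keys (fun x => x) false))
        (PySem.List.sorted cur.keys (fun x => x) false) := by
    apply List.filter_congr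
    intro k _
    simp [PySem.List.mem_sorted]
  have e3 : List.filter (fun x => !PySem.Set.contains cur.keys x)
        (PySem.List.sorted sig.keys (fun x => x) false)
      = List.filter (fun k => !decide (k ∈ PySem.List.sorted cur.keys (fun x => x) false))
        (PySem.List.sorted sig.keys (fun x => x) false) := by
    apply List.filter_congr
    intro k _
    simp [PySem.List.mem_sorted]
  rw [e1, e2, e3]
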